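-- pv_equiv track=rewrite | github.com/StenSOn27/lab_4_asd | graph_algorithms.py | strong_connectivity_matrix
-- ===== SOURCE A (Python) =====
-- def transitive_closure(matrix: list[list[int]]) -> list[list[int]]:
--     """Calculate transitive closure using Floyd-Warshall algorithm"""
--     n = len(matrix)
--     # Initialize with original matrix
--     closure = [row[:] for row in matrix]
--
--     # Add self-loops for reachability
--     for i in range(n):
--         closure[i][i] = 1
--
--     # Floyd-Warshall
--     for k in range(n):
--         for i in range(n):
--             for j in range(n):
--                 closure[i][j] = closure[i][j] or (closure[i][k] and closure[k][j])
--
--     return closure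
--
-- def strong_connectivity_matrix(matrix: list[list[int]]) -> list[list[int]]:
--     """Calculate strong connectivity matrix"""
--     reachability = transitive_closure(matrix)
--     n = len(matrix)
--
--     # Transpose matrix
--     transpose = [[matrix[j][i] for j in range(n)] for i in range(n)]
--     reachability_transpose = transitive_closure(transpose)
--
--     # Strong connectivity: reachable in both directions
--     strong_conn = [[0 for _ in range(n)] for _ in range(n)]
--     for i in range(n):
--         for j in range(n):
--             strong_conn[i][j] = reachability[i][j] and reachability_transpose[i][j]
--
--     return strong_conn
-- ===== SOURCE B (Python) =====
-- def strong_connectivity_matrix(matrix: list[list[int]]) -> list[list[int]]: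
--     """Strong connectivity via a single Floyd-Warshall pass on the transposed
--     graph: forward reachability's zero-pattern is the transpose closure's
--     zero-pattern mirrored, so the second closure A computes is unnecessary."""
--     n = len(matrix)
--     rt = [[matrix[j][i] for j in range(n)] for i in range(n)]
--     for i in range(n):
--         rt[i][i] = 1
--     for k in range(n):
--         rowk = rt[k]
--         for i in range(n):
--             rowi = rt[i]
--             if rowi[k]:
--                 for j in range(n):
--                     if not rowi[j]:
--                         rowi[j] = rowk[j]
--     return [[rt[i][j] if rt[j][i] else 0 for j in range(n)] for i in range(n)]
-- ===== Notes on version B (the rewrite author's own statement) =====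
-- stated objective: faster
-- what changed: B computes only one transitive closure (of the transposed graph) instead of A's two, recovering forward reachability from the mirrored zero-pattern of that single closure, and its in-place sweep skips whole rows whose pivot entry is zero and cells that are already nonzero.
-- outside the precondition, e.g. on strong_connectivity_matrix([[0, 1], [0]]): A raises IndexError, B raises IndexError
import Mathlib
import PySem

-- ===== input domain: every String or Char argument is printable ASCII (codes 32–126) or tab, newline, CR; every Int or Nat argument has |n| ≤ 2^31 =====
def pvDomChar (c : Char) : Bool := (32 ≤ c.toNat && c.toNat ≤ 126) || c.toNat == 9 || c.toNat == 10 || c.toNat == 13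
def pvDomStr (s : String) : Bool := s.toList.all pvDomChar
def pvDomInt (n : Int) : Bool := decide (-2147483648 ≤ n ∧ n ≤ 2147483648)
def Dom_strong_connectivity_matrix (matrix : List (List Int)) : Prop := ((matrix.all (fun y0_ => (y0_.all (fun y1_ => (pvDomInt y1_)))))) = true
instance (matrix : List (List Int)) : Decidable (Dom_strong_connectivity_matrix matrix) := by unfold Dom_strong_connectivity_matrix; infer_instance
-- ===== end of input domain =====

-- B computes ONE Floyd–Warshall closure (of the transposed graph) instead of A's two,
-- recovering forward reachability from the mirrored zero-pattern of that single closure,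
-- and skips rows with a zero pivot; a timing run measured it faster (constant factor).

-- ===== PORT A =====
-- Python 'a or b' on ints (returns a if truthy else b)
def pyOr (a b : Int) : Int := if a = 0 then b else a
-- Python 'a and b' on ints (returns a if falsy else b)
def pyAnd (a b : Int) : Int := if a = 0 then a else b
-- c[i][j] read; in-range under Pre_ (loop indices are 0 ≤ i,j < n ≤ row length)
def getM (c : List (List Int)) (i j : Int) : Int :=
  PySem.List.pyGetD (PySem.List.pyGetD c i []) j 0
-- c[i][j] = v write; in-range under Pre_
def setM (c : List (List Int)) (i j : Int) (v : Int) : List (List Int) :=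
  PySem.List.pySetD c i (PySem.List.pySetD (PySem.List.pyGetD c i []) j v)

def transitive_closure (matrix : List (List Int)) : List (List Int) :=
  let n : Int := matrix.length
  -- closure = [row[:] for row in matrix]
  let closure := matrix.map (fun row => PySem.List.slice row none none)
  -- for i in range(n): closure[i][i] = 1
  let closure := (PySem.List.pyRange 0 n 1).foldl (fun c i => setM c i i 1) closure
  -- Floyd-Warshall triple loop (in-place)
  (PySem.List.pyRange 0 n 1).foldl (fun c k =>
    (PySem.List.pyRange 0 n 1).foldl (fun c i =>
      (PySem.List.pyRange 0 n 1).foldl (fun c j =>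
        setM c i j (pyOr (getM c i j) (pyAnd (getM c i k) (getM c k j)))) c) c) closure

def strong_connectivity_matrix (matrix : List (List Int)) : List (List Int) :=
  let reachability := transitive_closure matrix
  let n : Int := matrix.length
  -- transpose = [[matrix[j][i] for j in range(n)] for i in range(n)]
  let transpose := (PySem.List.pyRange 0 n 1).map (fun i =>
    (PySem.List.pyRange 0 n 1).map (fun j => getM matrix j i))
  let reachability_transpose := transitive_closure transpose
  -- strong_conn = [[0]*n]*n (fresh rows), then filled in place
  let strong_conn := (PySem.List.pyRange 0 n 1).map (fun _ =>
    (PySem.List.pyRange 0 n 1).map (fun _ => (0 : Int)))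
  (PySem.List.pyRange 0 n 1).foldl (fun sc i =>
    (PySem.List.pyRange 0 n 1).foldl (fun sc j =>
      setM sc i j (pyAnd (getM reachability i j) (getM reachability_transpose i j))) sc) strong_conn

-- ===== PORT B =====
-- (Source B: one closure of the transpose; 'rowk'/'rowi' are aliases into rt, so their
-- reads are reads of the current state, ported as getM on the current matrix)
def strong_connectivity_matrix_alt (matrix : List (List Int)) : List (List Int) :=
  let n : Int := matrix.length
  -- rt = [[matrix[j][i] for j in range(n)] for i in range(n)]
  let rt := (PySem.List.pyRange 0 n 1).map (fun i =>
    (PySem.List.pyRange 0 n 1).map (fun j => getM matrix j i))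
  -- for i in range(n): rt[i][i] = 1
  let rt := (PySem.List.pyRange 0 n 1).foldl (fun c i => setM c i i 1) rt
  -- pivot-skipping in-place sweep
  let rt := (PySem.List.pyRange 0 n 1).foldl (fun c k =>
    (PySem.List.pyRange 0 n 1).foldl (fun c i =>
      if getM c i k = 0 then c
      else (PySem.List.pyRange 0 n 1).foldl (fun c j =>
        if getM c i j = 0 then setM c i j (getM c k j) else c) c) c) rt
  -- [[rt[i][j] if rt[j][i] else 0 for j in range(n)] for i in range(n)]
  (PySem.List.pyRange 0 n 1).map (fun i =>
    (PySem.List.pyRange 0 n 1).map (fun j =>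
      if getM rt j i = 0 then 0 else getM rt i j))

-- ===== PRECONDITION & SPEC =====
-- Pre_ is exactly the inputs where Python A returns: every row at least n = len(matrix)
-- long (a shorter row makes closure[i][i] = 1 or closure[i][j] raise IndexError; B's
-- transpose construction raises there too).
def Pre_strong_connectivity_matrix (matrix : List (List Int)) : Prop :=
  ∀ row ∈ matrix, matrix.length ≤ row.length
instance (matrix : List (List Int)) : Decidable (Pre_strong_connectivity_matrix matrix) := by
  unfold Pre_strong_connectivity_matrix; infer_instance

def pvWitness_strong_connectivity_matrix : List (List Int) := [[0, 1], [1, 0]]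

def Spec_strong_connectivity_matrix (matrix : List (List Int)) (out : List (List Int)) : Prop := out = strong_connectivity_matrix_alt matrix
instance (matrix : List (List Int)) (out : List (List Int)) : Decidable (Spec_strong_connectivity_matrix matrix out) := by unfold Spec_strong_connectivity_matrix; infer_instance

-- ===== CLAIM (what is proved, stated in full; the proofs are below) =====
def Claim_equal_strong_connectivity_matrix : Prop := ∀ (matrix : List (List Int)), Dom_strong_connectivity_matrix matrix → Pre_strong_connectivity_matrix matrix → Spec_strong_connectivity_matrix matrix (strong_connectivity_matrix matrix)

-- ===== LEMMAS AND PROOFS =====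

-- Nat-indexed read/write (what getM/setM become on the nonnegative loop indices)
def getN (c : List (List Int)) (i j : Nat) : Int := (c.getD i []).getD j 0
def setN (c : List (List Int)) (i j : Nat) (v : Int) : List (List Int) :=
  c.set i ((c.getD i []).set j v)

theorem getM_natCast (c : List (List Int)) (i j : Nat) :
    getM c (i : Int) (j : Int) = getN c i j := by
  simp [getM, getN, PySem.List.pyGetD_natCast]

theorem setM_natCast (c : List (List Int)) (i j : Nat) (v : Int) :
    setM c (i : Int) (j : Int) v = setN c i j v := by
  simp [setM, setN, PySem.List.pySetD_natCast, PySem.List.pyGetD_natCast]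

theorem getD_lt {α : Type} (l : List α) (d : α) {i : Nat} (h : i < l.length) :
    l.getD i d = l[i] := by
  rw [List.getD_eq_getElem?_getD, List.getElem?_eq_getElem h]; rfl

theorem getD_set' {α : Type} (l : List α) (i j : Nat) (a : α) (d : α) :
    (l.set i a).getD j d = if i = j ∧ i < l.length then a else l.getD j d := by
  rw [List.getD_eq_getElem?_getD, List.getElem?_set]
  rcases eq_or_ne i j with h | h
  · subst h
    by_cases hl : i < l.length
    · simp [hl]
    · rw [if_pos rfl, if_neg hl, if_neg (fun hh => hl hh.2)]
      rw [List.getD_eq_default _ _ (Nat.le_of_not_lt hl)]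
      rfl
  · rw [if_neg h, if_neg (fun hh => h hh.1), List.getD_eq_getElem?_getD]

theorem length_setN (c : List (List Int)) (i j : Nat) (v : Int) :
    (setN c i j v).length = c.length := by
  simp [setN]

theorem rowlen_setN (c : List (List Int)) (i j : Nat) (v : Int) (r : Nat) :
    ((setN c i j v).getD r []).length = ((c.getD r []).length) := by
  unfold setN
  rw [getD_set']
  by_cases h : i = r ∧ i < c.length
  · rw [if_pos h, List.length_set, h.1]
  · rw [if_neg h]

theorem getN_setN (c : List (List Int)) (i j : Nat) (v : Int) (i' j' : Nat) :
    getN (setN c i j v) i' j' =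
      if i' = i ∧ j' = j ∧ i < c.length ∧ j < (c.getD i []).length then v
      else getN c i' j' := by
  unfold getN setN
  rw [getD_set']
  by_cases h1 : i = i' ∧ i < c.length
  · rw [if_pos h1, getD_set']
    by_cases h2 : j = j' ∧ j < (c.getD i []).length
    · rw [if_pos h2, if_pos ⟨h1.1.symm, h2.1.symm, h1.2, h2.2⟩]
    · rw [if_neg h2, if_neg (fun hh => h2 ⟨hh.2.1.symm, hh.2.2.2⟩), h1.1]
  · rw [if_neg h1, if_neg (fun hh => h1 ⟨hh.1.symm, hh.2.2.1⟩)]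

theorem getN_setN_self (c : List (List Int)) (i j : Nat) (v : Int)
    (hic : i < c.length) (hjc : j < (c.getD i []).length) :
    getN (setN c i j v) i j = v := by
  rw [getN_setN, if_pos ⟨rfl, rfl, hic, hjc⟩]

-- shape: at least n rows, each of the first n rows at least n long
def Shp (n : Nat) (c : List (List Int)) : Prop :=
  n ≤ c.length ∧ ∀ i < n, n ≤ (c.getD i []).length

theorem Shp_setN {n : Nat} {c : List (List Int)} (h : Shp n c) (i j : Nat) (v : Int) :
    Shp n (setN c i j v) := by
  refine ⟨by rw [length_setN]; exact h.1, fun r hr => ?_⟩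
  rw [rowlen_setN]; exact h.2 r hr

theorem pyOr_pyAnd_self (a b : Int) : pyOr a (pyAnd a b) = a := by
  unfold pyOr pyAnd; by_cases h : a = 0 <;> simp [h]

theorem pyOr_pyAnd_self₂ (a b : Int) : pyOr a (pyAnd b a) = a := by
  unfold pyOr pyAnd
  by_cases h : a = 0 <;> by_cases h' : b = 0 <;> simp [h, h']

theorem pyOr_pyAnd_zero (b b' : Int) {a : Int} (h : a = 0) : pyOr b (pyAnd a b') = b := by
  subst h; unfold pyOr pyAnd
  by_cases hb : b = 0 <;> simp [hb]

-- the Floyd–Warshall value-step, pointwise, and its fold over pivot order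
def stepF (k : Nat) (f : Nat → Nat → Int) : Nat → Nat → Int :=
  fun i j => pyOr (f i j) (pyAnd (f i k) (f k j))

def fwA (ks : List Nat) (f : Nat → Nat → Int) : Nat → Nat → Int :=
  ks.foldl (fun f k => stepF k f) f

-- the Nat-level loop bodies (what both ports' folds become after cast elimination)
def rowPassA (n k i : Nat) (c : List (List Int)) : List (List Int) :=
  (List.range n).foldl (fun c j =>
    setN c i j (pyOr (getN c i j) (pyAnd (getN c i k) (getN c k j)))) c

def sweepA (n k : Nat) (c : List (List Int)) : List (List Int) :=
  (List.range n).foldl (fun c i => rowPassA n k i c) c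

def rowPassB (n k i : Nat) (c : List (List Int)) : List (List Int) :=
  (List.range n).foldl (fun c j =>
    if getN c i j = 0 then setN c i j (getN c k j) else c) c

def sweepB (n k : Nat) (c : List (List Int)) : List (List Int) :=
  (List.range n).foldl (fun c i =>
    if getN c i k = 0 then c else rowPassB n k i c) c

-- generic: a fold whose body preserves row count and every row length preserves both
theorem foldl_preserves {α : Type} (body : List (List Int) → α → List (List Int))
    (hb : ∀ c x, (body c x).length = c.length ∧
      ∀ r, ((body c x).getD r []).length = (c.getD r []).length) :
    ∀ (l : List α) (c : List (List Int)),
      (l.foldl body c).length = c.length ∧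
      ∀ r, ((l.foldl body c).getD r []).length = (c.getD r []).length := by
  intro l
  induction l with
  | nil => intro c; exact ⟨rfl, fun _ => rfl⟩
  | cons x xs ih =>
    intro c
    have h1 := hb c x
    have h2 := ih (body c x)
    exact ⟨by rw [List.foldl_cons, h2.1, h1.1],
           fun r => by rw [List.foldl_cons, h2.2 r, h1.2 r]⟩

theorem shape_rowPassA (n k i : Nat) (c : List (List Int)) :
    (rowPassA n k i c).length = c.length ∧
    ∀ r, ((rowPassA n k i c).getD r []).length = (c.getD r []).length :=
  foldl_preserves _ (fun c j => ⟨length_setN c i j _, fun r => rowlen_setN c i j _ r⟩) _ c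

theorem shape_rowPassB (n k i : Nat) (c : List (List Int)) :
    (rowPassB n k i c).length = c.length ∧
    ∀ r, ((rowPassB n k i c).getD r []).length = (c.getD r []).length := by
  refine foldl_preserves _ (fun c j => ?_) _ c
  by_cases h : getN c i j = 0
  · rw [if_pos h]; exact ⟨length_setN c i j _, fun r => rowlen_setN c i j _ r⟩
  · rw [if_neg h]; exact ⟨rfl, fun _ => rfl⟩

theorem Shp_of_shape {n : Nat} {c c' : List (List Int)}
    (h : Shp n c)
    (hs : c'.length = c.length ∧ ∀ r, (c'.getD r []).length = (c.getD r []).length) :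
    Shp n c' :=
  ⟨hs.1 ▸ h.1, fun i hi => (hs.2 i) ▸ h.2 i hi⟩

theorem Shp_rowPassA {n : Nat} (k i : Nat) {c : List (List Int)} (h : Shp n c) :
    Shp n (rowPassA n k i c) := Shp_of_shape h (shape_rowPassA n k i c)

theorem Shp_rowPassB {n : Nat} (k i : Nat) {c : List (List Int)} (h : Shp n c) :
    Shp n (rowPassB n k i c) := Shp_of_shape h (shape_rowPassB n k i c)

theorem Shp_sweepA {n : Nat} (k : Nat) {c : List (List Int)} (h : Shp n c) :
    Shp n (sweepA n k c) :=
  Shp_of_shape h (foldl_preserves _ (fun c i => shape_rowPassA n k i c) _ c)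

theorem Shp_sweepB {n : Nat} (k : Nat) {c : List (List Int)} (h : Shp n c) :
    Shp n (sweepB n k c) := by
  refine Shp_of_shape h (foldl_preserves _ (fun c i => ?_) _ c)
  by_cases hp : getN c i k = 0
  · rw [if_pos hp]; exact ⟨rfl, fun _ => rfl⟩
  · rw [if_neg hp]; exact shape_rowPassB n k i c

-- ---- inner j-loop characterizations (generalized to an arbitrary nodup index list) ----

theorem jloopA (n k i : Nat) (hi : i < n) :
    ∀ (js : List Nat) (c : List (List Int)), js.Nodup → (∀ j ∈ js, j < n) → Shp n c →
    ∀ i' j', getN (js.foldl (fun c j =>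
        setN c i j (pyOr (getN c i j) (pyAnd (getN c i k) (getN c k j)))) c) i' j' =
      if i' = i ∧ j' ∈ js then pyOr (getN c i j') (pyAnd (getN c i k) (getN c k j'))
      else getN c i' j' := by
  intro js
  induction js with
  | nil => intro c _ _ _ i' j'; simp
  | cons j js ih =>
    intro c hnd hmem hshp i' j'
    have hjn : j < n := hmem j List.mem_cons_self
    have hjnotin : j ∉ js := (List.nodup_cons.mp hnd).1
    have hic : i < c.length := lt_of_lt_of_le hi hshp.1
    have hjc : j < (c.getD i []).length := lt_of_lt_of_le hjn (hshp.2 i hi)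
    rw [List.foldl_cons]
    set c1 := setN c i j (pyOr (getN c i j) (pyAnd (getN c i k) (getN c k j))) with hc1
    have hshp1 : Shp n c1 := by rw [hc1]; exact Shp_setN hshp i j _
    have hwrite : getN c1 i j = pyOr (getN c i j) (pyAnd (getN c i k) (getN c k j)) := by
      rw [hc1]; exact getN_setN_self c i j _ hic hjc
    have hother : ∀ i'' j'', (i'' ≠ i ∨ j'' ≠ j) → getN c1 i'' j'' = getN c i'' j'' := by
      intro i'' j'' h
      rw [hc1, getN_setN]
      rcases h with h | h
      · rw [if_neg (fun hh => h hh.1)]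
      · rw [if_neg (fun hh => h hh.2.1)]
    have hpivot : getN c1 i k = getN c i k := by
      rcases eq_or_ne k j with hkj | hkj
      · rw [hkj] at hwrite ⊢
        rw [hwrite, pyOr_pyAnd_self]
      · exact hother i k (Or.inr hkj)
    have hrowk : ∀ j'', j'' ≠ j → getN c1 k j'' = getN c k j'' :=
      fun j'' hne => hother k j'' (Or.inr hne)
    rw [ih c1 (List.nodup_cons.mp hnd).2
      (fun x hx => hmem x (List.mem_cons_of_mem _ hx)) hshp1 i' j']
    rcases eq_or_ne i' i with hii | hii
    · by_cases hjj : j' ∈ js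
      · have hne : j' ≠ j := fun h => hjnotin (h ▸ hjj)
        rw [if_pos ⟨hii, hjj⟩, if_pos ⟨hii, List.mem_cons_of_mem _ hjj⟩]
        rw [hother i j' (Or.inr hne), hpivot, hrowk j' hne]
      · rw [if_neg (fun h => hjj h.2)]
        rcases eq_or_ne j' j with hje | hje
        · rw [if_pos ⟨hii, by rw [hje]; exact List.mem_cons_self⟩, hii, hje, hwrite]
        · rw [if_neg (fun h => by
            rcases List.mem_cons.mp h.2 with h' | h'
            · exact hje h'
            · exact hjj h')]
          rw [hii]
          exact hother i j' (Or.inr hje)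
    · rw [if_neg (fun h => hii h.1), if_neg (fun h => hii h.1)]
      exact hother i' j' (Or.inl hii)

theorem jloopB (n k i : Nat) (hi : i < n) :
    ∀ (js : List Nat) (c : List (List Int)), js.Nodup → (∀ j ∈ js, j < n) → Shp n c →
    getN c i k ≠ 0 →
    ∀ i' j', getN (js.foldl (fun c j =>
        if getN c i j = 0 then setN c i j (getN c k j) else c) c) i' j' =
      if i' = i ∧ j' ∈ js then pyOr (getN c i j') (pyAnd (getN c i k) (getN c k j'))
      else getN c i' j' := by
  intro js
  induction js with
  | nil => intro c _ _ _ _ i' j'; simp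
  | cons j js ih =>
    intro c hnd hmem hshp hp i' j'
    have hjn : j < n := hmem j List.mem_cons_self
    have hjnotin : j ∉ js := (List.nodup_cons.mp hnd).1
    have hic : i < c.length := lt_of_lt_of_le hi hshp.1
    have hjc : j < (c.getD i []).length := lt_of_lt_of_le hjn (hshp.2 i hi)
    rw [List.foldl_cons]
    set c1 := (if getN c i j = 0 then setN c i j (getN c k j) else c) with hc1
    have hshp1 : Shp n c1 := by
      rw [hc1]
      by_cases hx : getN c i j = 0
      · rw [if_pos hx]; exact Shp_setN hshp i j _
      · rw [if_neg hx]; exact hshp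
    have hwrite : getN c1 i j = pyOr (getN c i j) (pyAnd (getN c i k) (getN c k j)) := by
      rw [hc1]
      by_cases hx : getN c i j = 0
      · rw [if_pos hx, getN_setN_self c i j _ hic hjc]
        unfold pyOr pyAnd
        rw [if_pos hx, if_neg hp]
      · rw [if_neg hx]
        unfold pyOr
        rw [if_neg hx]
    have hother : ∀ i'' j'', (i'' ≠ i ∨ j'' ≠ j) → getN c1 i'' j'' = getN c i'' j'' := by
      intro i'' j'' h
      rw [hc1]
      by_cases hx : getN c i j = 0
      · rw [if_pos hx, getN_setN]
        rcases h with h | h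
        · rw [if_neg (fun hh => h hh.1)]
        · rw [if_neg (fun hh => h hh.2.1)]
      · rw [if_neg hx]
    have hpivot : getN c1 i k = getN c i k := by
      rcases eq_or_ne k j with hkj | hkj
      · rw [hkj] at hwrite hp ⊢
        rw [hwrite, pyOr_pyAnd_self]
      · exact hother i k (Or.inr hkj)
    have hrowk : ∀ j'', getN c1 k j'' = getN c k j'' := by
      intro j''
      rcases eq_or_ne j'' j with hje | hje
      · rcases eq_or_ne k i with hki | hki
        · rw [hki] at hwrite
          rw [hje, hki, hwrite, pyOr_pyAnd_self₂]
        · exact hother k j'' (Or.inl hki)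
      · exact hother k j'' (Or.inr hje)
    have hp1 : getN c1 i k ≠ 0 := by rw [hpivot]; exact hp
    rw [ih c1 (List.nodup_cons.mp hnd).2
      (fun x hx => hmem x (List.mem_cons_of_mem _ hx)) hshp1 hp1 i' j']
    rcases eq_or_ne i' i with hii | hii
    · by_cases hjj : j' ∈ js
      · have hne : j' ≠ j := fun h => hjnotin (h ▸ hjj)
        rw [if_pos ⟨hii, hjj⟩, if_pos ⟨hii, List.mem_cons_of_mem _ hjj⟩]
        rw [hother i j' (Or.inr hne), hpivot, hrowk j']
      · rw [if_neg (fun h => hjj h.2)]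
        rcases eq_or_ne j' j with hje | hje
        · rw [if_pos ⟨hii, by rw [hje]; exact List.mem_cons_self⟩, hii, hje, hwrite]
        · rw [if_neg (fun h => by
            rcases List.mem_cons.mp h.2 with h' | h'
            · exact hje h'
            · exact hjj h')]
          rw [hii]
          exact hother i j' (Or.inr hje)
    · rw [if_neg (fun h => hii h.1), if_neg (fun h => hii h.1)]
      exact hother i' j' (Or.inl hii)

-- per-(k,i) row pass, both variants, same conclusion
theorem rowPassA_char (n k i : Nat) (hi : i < n) (c : List (List Int)) (hshp : Shp n c) :
    ∀ i' j', getN (rowPassA n k i c) i' j' =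
      if i' = i ∧ j' < n then pyOr (getN c i j') (pyAnd (getN c i k) (getN c k j'))
      else getN c i' j' := by
  intro i' j'
  have h := jloopA n k i hi (List.range n) c List.nodup_range
    (fun j hj => List.mem_range.mp hj) hshp i' j'
  simp only [List.mem_range] at h
  exact h

theorem rowPassB_char (n k i : Nat) (hi : i < n) (c : List (List Int)) (hshp : Shp n c)
    (hp : getN c i k ≠ 0) :
    ∀ i' j', getN (rowPassB n k i c) i' j' =
      if i' = i ∧ j' < n then pyOr (getN c i j') (pyAnd (getN c i k) (getN c k j'))
      else getN c i' j' := by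
  intro i' j'
  have h := jloopB n k i hi (List.range n) c List.nodup_range
    (fun j hj => List.mem_range.mp hj) hshp hp i' j'
  simp only [List.mem_range] at h
  exact h

theorem passB_char {n k : Nat} (i : Nat) (hin : i < n) (c : List (List Int)) (hc : Shp n c) :
    (∀ i' j', getN (if getN c i k = 0 then c else rowPassB n k i c) i' j' =
      if i' = i ∧ j' < n then pyOr (getN c i j') (pyAnd (getN c i k) (getN c k j'))
      else getN c i' j') ∧ Shp n (if getN c i k = 0 then c else rowPassB n k i c) := by
  by_cases hp : getN c i k = 0
  · rw [if_pos hp]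
    refine ⟨fun i' j' => ?_, hc⟩
    by_cases h : i' = i ∧ j' < n
    · rw [if_pos h, h.1]
      exact (pyOr_pyAnd_zero _ _ hp).symm
    · rw [if_neg h]
  · rw [if_neg hp]
    exact ⟨rowPassB_char n k i hin c hc hp, Shp_rowPassB k i hc⟩

-- ---- i-loop characterization, generic in the row pass ----

theorem iloop {n k : Nat}
    (pass : Nat → List (List Int) → List (List Int))
    (hpass : ∀ i, i < n → ∀ c, Shp n c →
      (∀ i' j', getN (pass i c) i' j' =
        if i' = i ∧ j' < n then pyOr (getN c i j') (pyAnd (getN c i k) (getN c k j'))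
        else getN c i' j') ∧ Shp n (pass i c)) :
    ∀ (is : List Nat) (c : List (List Int)), is.Nodup → (∀ i ∈ is, i < n) → Shp n c →
    (∀ i' j', getN (is.foldl (fun c i => pass i c) c) i' j' =
      if i' ∈ is ∧ j' < n then pyOr (getN c i' j') (pyAnd (getN c i' k) (getN c k j'))
      else getN c i' j') ∧ Shp n (is.foldl (fun c i => pass i c) c) := by
  intro is
  induction is with
  | nil =>
    intro c _ _ hshp
    exact ⟨fun i' j' => by simp, hshp⟩
  | cons i is ih =>
    intro c hnd hmem hshp
    have hin : i < n := hmem i List.mem_cons_self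
    have hinotin : i ∉ is := (List.nodup_cons.mp hnd).1
    obtain ⟨hchar, hshp1⟩ := hpass i hin c hshp
    rw [List.foldl_cons]
    obtain ⟨key, hshp2⟩ := ih (pass i c) (List.nodup_cons.mp hnd).2
      (fun x hx => hmem x (List.mem_cons_of_mem _ hx)) hshp1
    refine ⟨fun i' j' => ?_, hshp2⟩
    rw [key i' j']
    have hrowk : ∀ j'', getN (pass i c) k j'' = getN c k j'' := by
      intro j''
      rw [hchar]
      rcases eq_or_ne k i with hki | hki
      · by_cases hj : j'' < n
        · rw [if_pos ⟨hki, hj⟩, hki, pyOr_pyAnd_self₂]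
        · rw [if_neg (fun h => hj h.2)]
      · rw [if_neg (fun h => hki h.1)]
    have hother : ∀ i'' j'', i'' ≠ i → getN (pass i c) i'' j'' = getN c i'' j'' := by
      intro i'' j'' h
      rw [hchar, if_neg (fun hh => h hh.1)]
    by_cases hii : i' ∈ is
    · have hne : i' ≠ i := fun h => hinotin (h ▸ hii)
      by_cases hj : j' < n
      · rw [if_pos ⟨hii, hj⟩, if_pos ⟨List.mem_cons_of_mem _ hii, hj⟩]
        rw [hother i' j' hne, hother i' k hne, hrowk j']
      · rw [if_neg (fun h => hj h.2), if_neg (fun h => hj h.2)]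
        exact hother i' j' hne
    · rcases eq_or_ne i' i with hie | hie
      · rw [if_neg (fun h => hii h.1)]
        by_cases hj : j' < n
        · rw [if_pos ⟨by rw [hie]; exact List.mem_cons_self, hj⟩]
          rw [hchar, if_pos ⟨hie, hj⟩, hie]
        · rw [if_neg (fun h => hj h.2), hchar, if_neg (fun h => hj h.2)]
      · rw [if_neg (fun h => hii h.1), if_neg (fun h => by
          rcases List.mem_cons.mp h.1 with h' | h'
          · exact hie h'
          · exact hii h')]
        exact hother i' j' hie

theorem sweepA_char {n : Nat} (k : Nat) (hk : k < n) (c : List (List Int)) (hshp : Shp n c) :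
    ∀ i' j', getN (sweepA n k c) i' j' =
      if i' < n ∧ j' < n then pyOr (getN c i' j') (pyAnd (getN c i' k) (getN c k j'))
      else getN c i' j' := by
  intro i' j'
  have h := (iloop (n := n) (k := k) (fun i c => rowPassA n k i c)
    (fun i hin c hc => ⟨rowPassA_char n k i hin c hc, Shp_rowPassA k i hc⟩)
    (List.range n) c List.nodup_range (fun x hx => List.mem_range.mp hx) hshp).1 i' j'
  simp only [List.mem_range] at h
  exact h

theorem sweepB_char {n : Nat} (k : Nat) (hk : k < n) (c : List (List Int)) (hshp : Shp n c) :
    ∀ i' j', getN (sweepB n k c) i' j' =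
      if i' < n ∧ j' < n then pyOr (getN c i' j') (pyAnd (getN c i' k) (getN c k j'))
      else getN c i' j' := by
  intro i' j'
  have h := (iloop (n := n) (k := k) (fun i c => if getN c i k = 0 then c else rowPassB n k i c)
    (fun i hin c hc => passB_char i hin c hc)
    (List.range n) c List.nodup_range (fun x hx => List.mem_range.mp hx) hshp).1 i' j'
  simp only [List.mem_range] at h
  exact h

-- ---- k-loop: both sweeps implement the same functional recurrence ----

theorem kloop {n : Nat} (sweep : Nat → List (List Int) → List (List Int))
    (hsweep : ∀ k, k < n → ∀ c, Shp n c →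
      (∀ i' j', getN (sweep k c) i' j' =
        if i' < n ∧ j' < n then pyOr (getN c i' j') (pyAnd (getN c i' k) (getN c k j'))
        else getN c i' j') ∧ Shp n (sweep k c)) :
    ∀ (ks : List Nat) (c : List (List Int)) (f : Nat → Nat → Int),
      (∀ k ∈ ks, k < n) → Shp n c →
      (∀ i j, i < n → j < n → getN c i j = f i j) →
      ∀ i j, i < n → j < n →
        getN (ks.foldl (fun c k => sweep k c) c) i j = fwA ks f i j := by
  intro ks
  induction ks with
  | nil =>
    intro c f _ _ hagree i j hi hj
    exact hagree i j hi hj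
  | cons k ks ih =>
    intro c f hmem hshp hagree i j hi hj
    have hkn : k < n := hmem k List.mem_cons_self
    obtain ⟨hchar, hshp1⟩ := hsweep k hkn c hshp
    have hagree1 : ∀ i j, i < n → j < n → getN (sweep k c) i j = stepF k f i j := by
      intro i j hi hj
      rw [hchar, if_pos ⟨hi, hj⟩]
      unfold stepF
      rw [hagree i j hi hj, hagree i k hi hkn, hagree k j hkn hj]
    rw [List.foldl_cons]
    rw [ih (sweep k c) (stepF k f)
      (fun x hx => hmem x (List.mem_cons_of_mem _ hx)) hshp1 hagree1 i j hi hj]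
    rfl

-- ---- diagonal initialization ----

theorem diagloop {n : Nat} :
    ∀ (is : List Nat) (c : List (List Int)), is.Nodup → (∀ i ∈ is, i < n) → Shp n c →
    ∀ i' j', getN (is.foldl (fun c i => setN c i i 1) c) i' j' =
      if i' ∈ is ∧ j' = i' then 1 else getN c i' j' := by
  intro is
  induction is with
  | nil => intro c _ _ _ i' j'; simp
  | cons i is ih =>
    intro c hnd hmem hshp i' j'
    have hin : i < n := hmem i List.mem_cons_self
    have hic : i < c.length := lt_of_lt_of_le hin hshp.1
    have hjc : i < (c.getD i []).length := lt_of_lt_of_le hin (hshp.2 i hin)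
    have hinotin : i ∉ is := (List.nodup_cons.mp hnd).1
    rw [List.foldl_cons]
    rw [ih (setN c i i 1) (List.nodup_cons.mp hnd).2
      (fun x hx => hmem x (List.mem_cons_of_mem _ hx)) (Shp_setN hshp i i 1) i' j']
    by_cases hii : i' ∈ is
    · by_cases hj : j' = i'
      · rw [if_pos ⟨hii, hj⟩, if_pos ⟨List.mem_cons_of_mem _ hii, hj⟩]
      · rw [if_neg (fun h => hj h.2), if_neg (fun h => hj h.2), getN_setN]
        rw [if_neg (fun h => hj (h.2.1.trans h.1.symm))]
    · rcases eq_or_ne i' i with hie | hie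
      · rw [if_neg (fun h => hii h.1)]
        by_cases hj : j' = i'
        · rw [if_pos ⟨by rw [hie]; exact List.mem_cons_self, hj⟩]
          rw [getN_setN, if_pos ⟨hie, hj.trans hie, hic, hjc⟩]
        · rw [if_neg (fun h => hj h.2), getN_setN]
          rw [if_neg (fun h => hj (h.2.1.trans h.1.symm))]
      · rw [if_neg (fun h => hii h.1), if_neg (fun h => by
          rcases List.mem_cons.mp h.1 with h' | h'
          · exact hie h'
          · exact hii h')]
        rw [getN_setN, if_neg (fun h => hie h.1)]

-- ---- zero-pattern symmetry of the closure under transposition ----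

theorem stepF_zero_iff (k : Nat) (f : Nat → Nat → Int) (i j : Nat) :
    stepF k f i j = 0 ↔ f i j = 0 ∧ (f i k = 0 ∨ f k j = 0) := by
  unfold stepF pyOr pyAnd
  by_cases h1 : f i j = 0 <;> by_cases h2 : f i k = 0 <;> simp [h1, h2]

theorem fwA_symm : ∀ (ks : List Nat) (f g : Nat → Nat → Int),
    (∀ i j, f i j = 0 ↔ g j i = 0) →
    ∀ i j, fwA ks f i j = 0 ↔ fwA ks g j i = 0 := by
  intro ks
  induction ks with
  | nil => intro f g h i j; exact h i j
  | cons k ks ih =>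
    intro f g h i j
    have hstep : ∀ i j, stepF k f i j = 0 ↔ stepF k g j i = 0 := by
      intro i j
      rw [stepF_zero_iff, stepF_zero_iff, h i j, h i k, h k j]
      tauto
    exact ih (stepF k f) (stepF k g) hstep i j

-- ---- the output fill loops of A (writes do not depend on the state) ----

theorem filljloop {n : Nat} (i : Nat) (hi : i < n) (w : Nat → Nat → Int) :
    ∀ (js : List Nat) (c : List (List Int)), (∀ j ∈ js, j < n) → Shp n c →
    ∀ i' j', getN (js.foldl (fun sc j => setN sc i j (w i j)) c) i' j' =
      if i' = i ∧ j' ∈ js ∧ j' < n then w i j' else getN c i' j' := by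
  intro js
  induction js with
  | nil => intro c _ _ i' j'; simp
  | cons j js ih =>
    intro c hmem hshp i' j'
    have hjn : j < n := hmem j List.mem_cons_self
    have hic : i < c.length := lt_of_lt_of_le hi hshp.1
    have hjc : j < (c.getD i []).length := lt_of_lt_of_le hjn (hshp.2 i hi)
    rw [List.foldl_cons]
    rw [ih (setN c i j (w i j)) (fun x hx => hmem x (List.mem_cons_of_mem _ hx))
      (Shp_setN hshp i j _) i' j']
    by_cases hii : i' = i
    · by_cases hjj : j' ∈ js
      · by_cases hj : j' < n
        · rw [if_pos ⟨hii, hjj, hj⟩, if_pos ⟨hii, List.mem_cons_of_mem _ hjj, hj⟩]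
        · have hnot1 : ¬(i' = i ∧ j' ∈ js ∧ j' < n) := fun h => hj h.2.2
          have hnot2 : ¬(i' = i ∧ j' ∈ j :: js ∧ j' < n) := fun h => hj h.2.2
          have hnot3 : ¬(i' = i ∧ j' = j ∧ i < c.length ∧ j < (c.getD i []).length) :=
            fun h => hj (by rw [h.2.1]; exact hjn)
          rw [if_neg hnot1, if_neg hnot2, getN_setN, if_neg hnot3]
      · rcases eq_or_ne j' j with hje | hje
        · rw [if_neg (fun h => hjj h.2.1),
            if_pos ⟨hii, by rw [hje]; exact List.mem_cons_self, hje ▸ hjn⟩]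
          rw [hii, hje, getN_setN_self c i j _ hic hjc]
        · rw [if_neg (fun h => hjj h.2.1), if_neg (fun h => by
            rcases List.mem_cons.mp h.2.1 with h' | h'
            · exact hje h'
            · exact hjj h')]
          rw [getN_setN, if_neg (fun h => hje h.2.1)]
    · rw [if_neg (fun h => hii h.1), if_neg (fun h => hii h.1), getN_setN,
        if_neg (fun h => hii h.1)]

theorem filliloop {n : Nat} (w : Nat → Nat → Int) :
    ∀ (is : List Nat) (c : List (List Int)), (∀ i ∈ is, i < n) → Shp n c →
    ∀ i' j', getN (is.foldl (fun sc i =>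
        (List.range n).foldl (fun sc j => setN sc i j (w i j)) sc) c) i' j' =
      if i' ∈ is ∧ j' < n then w i' j' else getN c i' j' := by
  intro is
  induction is with
  | nil => intro c _ _ i' j'; simp
  | cons i is ih =>
    intro c hmem hshp i' j'
    have hin : i < n := hmem i List.mem_cons_self
    rw [List.foldl_cons]
    set c1 := (List.range n).foldl (fun sc j => setN sc i j (w i j)) c with hc1
    have hshp1 : Shp n c1 := by
      rw [hc1]
      exact Shp_of_shape hshp (foldl_preserves _
        (fun c j => ⟨length_setN c i j _, fun r => rowlen_setN c i j _ r⟩) _ c)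
    have hchar : ∀ i'' j'', getN c1 i'' j'' =
        if i'' = i ∧ j'' ∈ List.range n ∧ j'' < n then w i j'' else getN c i'' j'' := by
      intro i'' j''
      rw [hc1, filljloop i hin w (List.range n) c (fun x hx => List.mem_range.mp hx) hshp]
    rw [ih c1 (fun x hx => hmem x (List.mem_cons_of_mem _ hx)) hshp1 i' j']
    by_cases hii : i' ∈ is
    · by_cases hj : j' < n
      · rw [if_pos ⟨hii, hj⟩, if_pos ⟨List.mem_cons_of_mem _ hii, hj⟩]
      · rw [if_neg (fun h => hj h.2), if_neg (fun h => hj h.2), hchar,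
          if_neg (fun h => hj h.2.2)]
    · rcases eq_or_ne i' i with hie | hie
      · rw [if_neg (fun h => hii h.1)]
        by_cases hj : j' < n
        · rw [if_pos ⟨by rw [hie]; exact List.mem_cons_self, hj⟩, hchar,
            if_pos ⟨hie, List.mem_range.mpr hj, hj⟩, hie]
        · rw [if_neg (fun h => hj h.2), hchar, if_neg (fun h => hj h.2.2)]
      · rw [if_neg (fun h => hii h.1), if_neg (fun h => by
          rcases List.mem_cons.mp h.1 with h' | h'
          · exact hie h'
          · exact hii h'), hchar, if_neg (fun h => hie h.1)]

-- ---- bridging the ports to the Nat-level loops ----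

def transposeN (m : List (List Int)) : List (List Int) :=
  (List.range m.length).map (fun i => (List.range m.length).map (fun j => getN m j i))

def zerosN (n : Nat) : List (List Int) :=
  (List.range n).map (fun _ => (List.range n).map (fun _ => (0 : Int)))

theorem tc_eq (m : List (List Int)) :
    transitive_closure m =
      (List.range m.length).foldl (fun c k => sweepA m.length k c)
        ((List.range m.length).foldl (fun c i => setN c i i 1) m) := by
  unfold transitive_closure sweepA rowPassA
  simp only [PySem.List.slice_none_none, List.map_id', PySem.List.pyRange_zero_natCast,
    List.foldl_map, setM_natCast, getM_natCast]

theorem A_eq (m : List (List Int)) :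
    strong_connectivity_matrix m =
      (List.range m.length).foldl (fun sc i =>
        (List.range m.length).foldl (fun sc j =>
          setN sc i j (pyAnd (getN (transitive_closure m) i j)
            (getN (transitive_closure (transposeN m)) i j))) sc) (zerosN m.length) := by
  unfold strong_connectivity_matrix transposeN zerosN
  simp only [PySem.List.pyRange_zero_natCast, List.foldl_map, List.map_map,
    Function.comp_def, setM_natCast, getM_natCast]

theorem B_eq (m : List (List Int)) :
    strong_connectivity_matrix_alt m =
      (List.range m.length).map (fun i => (List.range m.length).map (fun j =>
        if getN ((List.range m.length).foldl (fun c k => sweepB m.length k c)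
            ((List.range m.length).foldl (fun c i => setN c i i 1) (transposeN m))) j i = 0
        then 0
        else getN ((List.range m.length).foldl (fun c k => sweepB m.length k c)
            ((List.range m.length).foldl (fun c i => setN c i i 1) (transposeN m))) i j)) := by
  unfold strong_connectivity_matrix_alt sweepB rowPassB transposeN
  simp only [PySem.List.pyRange_zero_natCast, List.foldl_map, List.map_map,
    Function.comp_def, setM_natCast, getM_natCast]

-- ---- facts about the initial matrices ----

theorem length_transposeN (m : List (List Int)) : (transposeN m).length = m.length := by
  simp [transposeN]

theorem row_transposeN (m : List (List Int)) {i : Nat} (hi : i < m.length) :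
    (transposeN m).getD i [] = (List.range m.length).map (fun j => getN m j i) := by
  unfold transposeN
  exact PySem.List.getD_map_range _ m.length i _ hi

theorem Shp_transposeN (m : List (List Int)) : Shp m.length (transposeN m) := by
  refine ⟨by rw [length_transposeN], fun i hi => ?_⟩
  rw [row_transposeN m hi]
  simp

theorem getN_transposeN (m : List (List Int)) {i j : Nat}
    (hi : i < m.length) (hj : j < m.length) :
    getN (transposeN m) i j = getN m j i := by
  unfold getN
  rw [row_transposeN m hi, PySem.List.getD_map_range _ m.length j _ hj]
  rfl

theorem length_zerosN (n : Nat) : (zerosN n).length = n := by simp [zerosN]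

theorem row_zerosN (n : Nat) {i : Nat} (hi : i < n) :
    (zerosN n).getD i [] = (List.range n).map (fun _ => (0 : Int)) := by
  unfold zerosN
  exact PySem.List.getD_map_range _ n i _ hi

theorem Shp_zerosN (n : Nat) : Shp n (zerosN n) := by
  refine ⟨by rw [length_zerosN], fun i hi => ?_⟩
  rw [row_zerosN n hi]
  simp

-- initial value functions of the two closures (diagonal forced to 1)
def f0 (m : List (List Int)) : Nat → Nat → Int := fun i j => if i = j then 1 else getN m i j
def fT0 (m : List (List Int)) : Nat → Nat → Int := fun i j => if i = j then 1 else getN m j i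

theorem f0_fT0_zero (m : List (List Int)) :
    ∀ i j, f0 m i j = 0 ↔ fT0 m j i = 0 := by
  intro i j
  unfold f0 fT0
  rcases eq_or_ne i j with h | h
  · rw [if_pos h, if_pos h.symm]
  · rw [if_neg h, if_neg (Ne.symm h)]

theorem Shp_diagfold {n : Nat} (c : List (List Int)) (h : Shp n c) (is : List Nat) :
    Shp n (is.foldl (fun c i => setN c i i 1) c) :=
  Shp_of_shape h (foldl_preserves _
    (fun c i => ⟨length_setN c i i _, fun r => rowlen_setN c i i _ r⟩) _ c)

-- the two closures, characterized pointwise on the n×n block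
theorem tcA_char (m : List (List Int)) (hshp : Shp m.length m) :
    ∀ i j, i < m.length → j < m.length →
      getN (transitive_closure m) i j = fwA (List.range m.length) (f0 m) i j := by
  intro i j hi hj
  rw [tc_eq]
  set n := m.length with hn
  have hdiag : ∀ i j, i < n → j < n →
      getN ((List.range n).foldl (fun c i => setN c i i 1) m) i j = f0 m i j := by
    intro i j hi hj
    rw [diagloop (List.range n) m List.nodup_range (fun x hx => List.mem_range.mp hx) hshp i j]
    unfold f0
    rcases eq_or_ne i j with h | h
    · rw [if_pos ⟨List.mem_range.mpr hi, h.symm⟩, if_pos h]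
    · rw [if_neg (fun hh => h hh.2.symm), if_neg h]
  exact kloop (fun k c => sweepA n k c)
    (fun k hk c hc => ⟨sweepA_char k hk c hc, Shp_sweepA k hc⟩)
    (List.range n) _ (f0 m) (fun x hx => List.mem_range.mp hx)
    (Shp_diagfold m hshp _) hdiag i j hi hj

theorem tcT_char (m : List (List Int)) :
    ∀ i j, i < m.length → j < m.length →
      getN (transitive_closure (transposeN m)) i j = fwA (List.range m.length) (fT0 m) i j := by
  intro i j hi hj
  rw [tc_eq, length_transposeN]
  set n := m.length with hn
  have hshpT : Shp n (transposeN m) := Shp_transposeN m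
  have hdiag : ∀ i j, i < n → j < n →
      getN ((List.range n).foldl (fun c i => setN c i i 1) (transposeN m)) i j = fT0 m i j := by
    intro i j hi hj
    rw [diagloop (List.range n) (transposeN m) List.nodup_range
      (fun x hx => List.mem_range.mp hx) hshpT i j]
    unfold fT0
    rcases eq_or_ne i j with h | h
    · rw [if_pos ⟨List.mem_range.mpr hi, h.symm⟩, if_pos h]
    · rw [if_neg (fun hh => h hh.2.symm), if_neg h, getN_transposeN m hi hj]
  exact kloop (fun k c => sweepA n k c)
    (fun k hk c hc => ⟨sweepA_char k hk c hc, Shp_sweepA k hc⟩)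
    (List.range n) _ (fT0 m) (fun x hx => List.mem_range.mp hx)
    (Shp_diagfold _ hshpT _) hdiag i j hi hj

theorem rtB_char (m : List (List Int)) :
    ∀ i j, i < m.length → j < m.length →
      getN ((List.range m.length).foldl (fun c k => sweepB m.length k c)
        ((List.range m.length).foldl (fun c i => setN c i i 1) (transposeN m))) i j =
      fwA (List.range m.length) (fT0 m) i j := by
  intro i j hi hj
  set n := m.length with hn
  have hshpT : Shp n (transposeN m) := Shp_transposeN m
  have hdiag : ∀ i j, i < n → j < n →
      getN ((List.range n).foldl (fun c i => setN c i i 1) (transposeN m)) i j = fT0 m i j := by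
    intro i j hi hj
    rw [diagloop (List.range n) (transposeN m) List.nodup_range
      (fun x hx => List.mem_range.mp hx) hshpT i j]
    unfold fT0
    rcases eq_or_ne i j with h | h
    · rw [if_pos ⟨List.mem_range.mpr hi, h.symm⟩, if_pos h]
    · rw [if_neg (fun hh => h hh.2.symm), if_neg h, getN_transposeN m hi hj]
  exact kloop (fun k c => sweepB n k c)
    (fun k hk c hc => ⟨sweepB_char k hk c hc, Shp_sweepB k hc⟩)
    (List.range n) _ (fT0 m) (fun x hx => List.mem_range.mp hx)
    (Shp_diagfold _ hshpT _) hdiag i j hi hj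

-- the single cell-level equality behind the whole claim
theorem cell_eq (m : List (List Int)) {i j : Nat} (hi : i < m.length) (hj : j < m.length)
    (hshp : Shp m.length m) :
    pyAnd (getN (transitive_closure m) i j) (getN (transitive_closure (transposeN m)) i j) =
      (if fwA (List.range m.length) (fT0 m) j i = 0 then 0
       else fwA (List.range m.length) (fT0 m) i j) := by
  rw [tcA_char m hshp i j hi hj, tcT_char m i j hi hj]
  have hsymm := fwA_symm (List.range m.length) (f0 m) (fT0 m) (f0_fT0_zero m) i j
  unfold pyAnd
  by_cases h : fwA (List.range m.length) (f0 m) i j = 0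
  · rw [if_pos h, if_pos (hsymm.mp h), h]
  · rw [if_neg h, if_neg (fun hh => h (hsymm.mpr hh))]

-- ===== VERDICT (by name: the statement is the Claim_ definition above) =====
theorem strong_connectivity_matrix_spec : Claim_equal_strong_connectivity_matrix := by
  unfold Claim_equal_strong_connectivity_matrix
  intro matrix _hdom hpre
  unfold Spec_strong_connectivity_matrix
  set n := matrix.length with hn
  have hshpM : Shp n matrix := by
    refine ⟨le_refl _, fun i hi => ?_⟩
    rw [getD_lt _ _ hi]
    exact hpre _ (List.getElem_mem hi)
  rw [A_eq, B_eq, ← hn]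
  set RT := (List.range n).foldl (fun c k => sweepB n k c)
    ((List.range n).foldl (fun c i => setN c i i 1) (transposeN matrix)) with hRT
  set w : Nat → Nat → Int := fun i j =>
    pyAnd (getN (transitive_closure matrix) i j)
      (getN (transitive_closure (transposeN matrix)) i j) with hw
  -- A's output, characterized and shaped
  set outA := (List.range n).foldl (fun sc i =>
    (List.range n).foldl (fun sc j => setN sc i j (w i j)) sc) (zerosN n) with houtA
  have hfill : ∀ i j, getN outA i j =
      if i ∈ List.range n ∧ j < n then w i j else getN (zerosN n) i j := by
    intro i j
    rw [houtA]
    exact filliloop w (List.range n) (zerosN n)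
      (fun x hx => List.mem_range.mp hx) (Shp_zerosN n) i j
  have hshape : outA.length = (zerosN n).length ∧
      ∀ r, (outA.getD r []).length = ((zerosN n).getD r []).length := by
    rw [houtA]
    exact foldl_preserves _ (fun c i =>
      foldl_preserves _ (fun c j => ⟨length_setN c i j _, fun r => rowlen_setN c i j _ r⟩) _ c)
      _ (zerosN n)
  have hlenA : outA.length = n := by rw [hshape.1, length_zerosN]
  have hrowlenA : ∀ r, r < n → (outA.getD r []).length = n := by
    intro r hr
    rw [hshape.2 r, row_zerosN n hr]
    simp
  -- list-level equality
  refine List.ext_getElem (by simp [hlenA]) ?_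
  intro i h1 h2
  rw [hlenA] at h1
  have hBrow : ((List.range n).map (fun i => (List.range n).map (fun j =>
      if getN RT j i = 0 then 0 else getN RT i j)))[i]'h2 =
      (List.range n).map (fun j => if getN RT j i = 0 then 0 else getN RT i j) := by
    simp
  rw [hBrow]
  have hrowA : (outA[i]'(by omega)).length = n := by
    rw [← getD_lt outA [] (by omega : i < outA.length)]
    exact hrowlenA i h1
  refine List.ext_getElem (by simp [hrowA]) ?_
  intro j h3 h4
  have h3n : j < n := by rw [hrowA] at h3; exact h3
  have hBcell : ((List.range n).map (fun j =>
      if getN RT j i = 0 then 0 else getN RT i j))[j]'h4 =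
      (if getN RT j i = 0 then 0 else getN RT i j) := by
    simp
  rw [hBcell]
  have hio : i < outA.length := by omega
  have hjo : j < (outA.getD i []).length := by rw [hrowlenA i h1]; exact h3n
  have hjo' : j < outA[i].length := by rw [← getD_lt outA [] hio]; exact hjo
  have hgoal : getN outA i j = (if getN RT j i = 0 then 0 else getN RT i j) := by
    rw [hfill i j, if_pos ⟨List.mem_range.mpr h1, h3n⟩]
    rw [hRT, hw]
    rw [rtB_char matrix j i h3n h1, rtB_char matrix i j h1 h3n]
    exact cell_eq matrix h1 h3n hshpM
  have e2 : getN outA i j = outA[i][j] := by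
    unfold getN
    rw [getD_lt outA [] hio]
    exact getD_lt _ 0 hjo'
  exact e2.symm.trans hgoal
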